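-- pv_equiv track=rewrite | github.com/uberales/aoc2018 | 02/aoc02.py | CountsAs
-- ===== SOURCE A (Python) =====
-- def CountsAs(s):
--     letters = set(s)
--     counts_2 = 0
--     let_2 = ''
--     counts_3 = 0
--
--     for l in letters:
--         n = 0
--         for c in s:
--             if c == l:
--                 n += 1
--         if n == 2:
--             counts_2 = 1
--         elif n == 3:
--             if let_2 == l:
--                 counts_2 = 0
--             counts_3 = 1
--
--     return (counts_2, counts_3)
-- ===== SOURCE B (Python) =====
-- def CountsAs(s):
--     counts = {}
--     for c in s:
--         counts[c] = counts.get(c, 0) + 1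
--     vals = counts.values()
--     return (int(2 in vals), int(3 in vals))
-- ===== Notes on version B (the rewrite author's own statement) =====
-- stated objective: faster
-- what changed: B replaces A's loop over set(s) that rescans the whole string for each distinct character with a single counting pass building a dict, then tests whether 2 and 3 occur among the counts.
import Mathlib
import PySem

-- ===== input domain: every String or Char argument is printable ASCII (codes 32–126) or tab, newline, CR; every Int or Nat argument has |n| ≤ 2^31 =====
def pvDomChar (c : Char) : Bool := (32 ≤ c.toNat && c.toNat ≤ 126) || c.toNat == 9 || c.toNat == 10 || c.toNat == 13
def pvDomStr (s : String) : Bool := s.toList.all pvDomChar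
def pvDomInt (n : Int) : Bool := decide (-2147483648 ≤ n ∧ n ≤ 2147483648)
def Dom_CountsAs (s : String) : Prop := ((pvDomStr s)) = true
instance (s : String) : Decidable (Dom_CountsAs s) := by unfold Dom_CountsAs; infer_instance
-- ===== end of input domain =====

-- B replaces A's per-distinct-letter rescans of s with one counting pass building a dict,
-- then a membership test of 2 and 3 among the counts (objective: faster, O(n) vs O(d*n)).

-- ===== PORT A =====
-- A iterates over set(s); its result (two 0/1 flags) does not depend on the iteration order.
-- let_2 (a str) is ported as a List Char (Python string equality is exact char-list equality).
def CountsAs (s : String) : List Int :=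
  let letters : PySem.Set Char := PySem.Set.ofList s.toList
  let st :=
    letters.foldl (fun (st : Int × List Char × Int) l =>
      let n : Int := s.toList.foldl (fun n c => if c == l then n + 1 else n) 0
      if n == 2 then (1, st.2.1, st.2.2)
      else if n == 3 then
        if st.2.1 == [l] then (0, st.2.1, 1) else (st.1, st.2.1, 1)
      else st) (0, ([] : List Char), 0)
  [st.1, st.2.2]

-- ===== PORT B =====
def CountsAs_alt (s : String) : List Int :=
  let counts := s.toList.foldl (fun (d : PySem.Dict Char Int) c => d.insert c (d.getD c 0 + 1)) PySem.Dict.empty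
  let vals := counts.values
  [if vals.contains 2 then 1 else 0, if vals.contains 3 then 1 else 0]

-- ===== PRECONDITION & SPEC =====
def Spec_CountsAs (s : String) (out : List Int) : Prop := out = CountsAs_alt s
instance (s : String) (out : List Int) : Decidable (Spec_CountsAs s out) := by unfold Spec_CountsAs; infer_instance

-- ===== CLAIM (what is proved, stated in full; the proofs are below) =====
def Claim_equal_CountsAs : Prop := ∀ (s : String), Dom_CountsAs s → Spec_CountsAs s (CountsAs s)

-- ===== LEMMAS AND PROOFS =====

-- A's loop over the distinct letters just sets the two flags; let_2 stays [].
theorem countsAs_fold (xs : List Char) (L : List Char) (c2 c3 : Int) :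
    L.foldl (fun (st : Int × List Char × Int) l =>
      let n : Int := xs.foldl (fun n c => if c == l then n + 1 else n) 0
      if n == 2 then (1, st.2.1, st.2.2)
      else if n == 3 then
        if st.2.1 == [l] then (0, st.2.1, 1) else (st.1, st.2.1, 1)
      else st) (c2, ([] : List Char), c3)
    = ((if L.any (fun l => xs.count l == 2) then 1 else c2), ([] : List Char),
       (if L.any (fun l => xs.count l == 3) then 1 else c3)) := by
  induction L generalizing c2 c3 with
  | nil => simp
  | cons l t ih =>
    simp only [List.foldl_cons, List.any_cons]
    rw [PySem.List.foldl_beq_add_one]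
    by_cases h2 : xs.count l = 2
    · rw [if_pos (by simp [h2] : ((0 : Int) + ↑(xs.count l) == 2) = true)]
      rw [ih]
      simp [h2]
    · by_cases h3 : xs.count l = 3
      · rw [if_neg (by simp [h3] : ¬ ((0 : Int) + ↑(xs.count l) == 2) = true)]
        rw [if_pos (by simp [h3] : ((0 : Int) + ↑(xs.count l) == 3) = true)]
        rw [if_neg (by simp : ¬ (([] : List Char) == [l]) = true)]
        rw [ih]
        simp [h3]
      · rw [if_neg (by simp; omega : ¬ ((0 : Int) + ↑(xs.count l) == 2) = true)]
        rw [if_neg (by simp; omega : ¬ ((0 : Int) + ↑(xs.count l) == 3) = true)]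
        rw [ih]
        simp [h2, h3]

theorem countsAs_eq (s : String) :
    CountsAs s = [if (PySem.Set.ofList s.toList).any (fun l => s.toList.count l == 2) then 1 else 0,
                  if (PySem.Set.ofList s.toList).any (fun l => s.toList.count l == 3) then 1 else 0] := by
  simp only [CountsAs, countsAs_fold]

theorem elem_vals_iff (s : String) (mI : Int) (mN : Nat) (hm : mI = (mN : Int)) :
    ((List.elem mI (List.map (fun x => x.2)
        (List.map (fun k => (k, (List.count k s.toList : Int))) (PySem.Set.ofList s.toList)))) = true)
    ↔ ((PySem.Set.ofList s.toList).any fun l => List.count l s.toList == mN) = true := by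
  subst hm
  simp only [List.elem_eq_mem, List.map_map, List.mem_map, decide_eq_true_eq, List.any_eq_true,
    beq_iff_eq, Function.comp]
  constructor
  · rintro ⟨a, ha, h⟩
    exact ⟨a, ha, by omega⟩
  · rintro ⟨a, ha, h⟩
    exact ⟨a, ha, by omega⟩

theorem countsAs_alt_eq (s : String) :
    CountsAs_alt s = [if (PySem.Set.ofList s.toList).any (fun l => s.toList.count l == 2) then 1 else 0,
                      if (PySem.Set.ofList s.toList).any (fun l => s.toList.count l == 3) then 1 else 0] := by
  simp only [CountsAs_alt, PySem.Dict.foldl_insert_getD_add_one_eq_counter, PySem.Dict.values,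
    PySem.Dict.items_counter]
  simp only [elem_vals_iff s 2 2 (by norm_num), elem_vals_iff s 3 3 (by norm_num)]

-- ===== VERDICT (by name: the statement is the Claim_ definition above) =====
theorem CountsAs_spec : Claim_equal_CountsAs := by
  intro s _
  unfold Spec_CountsAs
  rw [countsAs_eq, countsAs_alt_eq]
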